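-- pv_equiv track=rewrite | github.com/parkminh0/Programmers | Lv. 1/옹알이 (2).py | solution
-- ===== SOURCE A (Python) =====
-- def solution(babbling):
--     answer = 0
--     baby = ["aya", "ye", "woo", "ma"]
--
--     for i in babbling:
--         s = ''
--         tmp = ''
--         for j in i:
--             s += j
--             if s in baby:
--                 if s == tmp[-len(s):]:
--                     break
--                 tmp += s
--                 s = ''
--         if s == '':
--             answer += 1
--     return answer
-- ===== SOURCE B (Python) =====
-- def solution(babbling):
--     SYL = ("aya", "ye", "woo", "ma")
--
--     def ok(w):
--         prev = ""
--         while w: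
--             for t in SYL:
--                 if t != prev and w.startswith(t):
--                     prev = t
--                     w = w[len(t):]
--                     break
--             else:
--                 return False
--         return True
--
--     return sum(ok(w) for w in babbling)
-- ===== Notes on version B (the rewrite author's own statement) =====
-- stated objective: simpler
-- what changed: A builds substrings char-by-char with s/tmp accumulators and a negative-slice suffix check to detect a repeated syllable; B strips one allowed syllable (different from the previous one) at a time off the front of the word and counts the words that are consumed entirely.
import Mathlib
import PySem

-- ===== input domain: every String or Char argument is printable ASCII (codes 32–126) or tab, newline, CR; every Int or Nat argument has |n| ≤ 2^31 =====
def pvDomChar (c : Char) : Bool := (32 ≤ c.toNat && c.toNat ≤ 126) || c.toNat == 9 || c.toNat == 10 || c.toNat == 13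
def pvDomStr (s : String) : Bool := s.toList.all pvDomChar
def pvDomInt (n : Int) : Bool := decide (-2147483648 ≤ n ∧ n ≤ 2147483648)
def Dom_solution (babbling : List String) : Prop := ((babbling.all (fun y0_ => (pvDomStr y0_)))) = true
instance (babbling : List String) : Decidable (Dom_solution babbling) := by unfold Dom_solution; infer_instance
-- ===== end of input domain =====

-- B replaces A's char-by-char substring-building greedy loop with recursive syllable
-- stripping from the front (objective: simpler/idiomatic; same asymptotic cost).


-- ===== PORT A =====
-- baby = ["aya", "ye", "woo", "ma"]  (strings ported as lists of chars)
def babyA : List (List Char) := [['a','y','a'], ['y','e'], ['w','o','o'], ['m','a']]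

-- the inner 'for j in i' loop of A; state (s, tmp); 'break' returns the current s
-- (which is what the 'if s == ""' test afterwards sees). tmp[-len(s):] is the slice.
def loopA : List Char → List Char → List Char → List Char
  | [], s, _ => s
  | j :: rest, s, tmp =>
    let s' := s ++ [j]
    if s' ∈ babyA then
      if s' = PySem.List.slice tmp (some (-(s'.length : Int))) none then s'
      else loopA rest [] (tmp ++ s')
    else loopA rest s' tmp

def solution (babbling : List String) : Int :=
  babbling.foldl (fun answer i => if loopA i.toList [] [] = [] then answer + 1 else answer) 0

-- ===== PORT B =====
-- ok(w): while w is nonempty, strip one allowed syllable (≠ prev) off the front;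
-- the while loop is the tail recursion below;
-- the for-loop over the literal 4-tuple is unrolled; w.drop 3 = cs.drop 2 for w = c :: cs.
def okB (w : List Char) (prev : List Char) : Bool :=
  match w with
  | [] => true
  | c :: cs =>
    if ['a','y','a'] ≠ prev ∧ ['a','y','a'] <+: (c :: cs) then okB (cs.drop 2) ['a','y','a']
    else if ['y','e'] ≠ prev ∧ ['y','e'] <+: (c :: cs) then okB (cs.drop 1) ['y','e']
    else if ['w','o','o'] ≠ prev ∧ ['w','o','o'] <+: (c :: cs) then okB (cs.drop 2) ['w','o','o']
    else if ['m','a'] ≠ prev ∧ ['m','a'] <+: (c :: cs) then okB (cs.drop 1) ['m','a']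
    else false
termination_by w.length
decreasing_by all_goals simp

-- sum(ok(w) for w in babbling) over booleans = count of words with ok(w)
def solution_alt (babbling : List String) : Int :=
  ((babbling.countP (fun w => okB w.toList [])) : Int)

-- ===== PRECONDITION & SPEC =====
def Spec_solution (babbling : List String) (out : Int) : Prop := out = solution_alt babbling
instance (babbling : List String) (out : Int) : Decidable (Spec_solution babbling out) := by unfold Spec_solution; infer_instance

-- ===== CLAIM (what is proved, stated in full; the proofs are below) =====
def Claim_equal_solution : Prop := ∀ (babbling : List String), Dom_solution babbling → Spec_solution babbling (solution babbling)

-- ===== LEMMAS AND PROOFS =====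

-- t = xs[-|t|:]  ↔  t is a suffix of xs
theorem eq_slice_iff_suffix (t xs : List Char) (ht : t ≠ []) :
    (t = PySem.List.slice xs (some (-(t.length : Int))) none) ↔ t <:+ xs := by
  rw [PySem.List.slice_from_neg_natCast xs (k := t.length) (by
    cases t with | nil => exact absurd rfl ht | cons a l => simp)]
  constructor
  · intro h; rw [h]; exact List.drop_suffix _ _
  · rintro ⟨pre, rfl⟩
    have hl : (pre ++ t).length - t.length = pre.length := by simp
    rw [hl, List.drop_left]

-- for syllables t, u: t is a suffix of tmp ++ u iff t = u
theorem suffix_append_syl (tmp t u : List Char) (ht : t ∈ babyA) (hu : u ∈ babyA) :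
    (t <:+ tmp ++ u) ↔ t = u := by
  constructor
  · intro h
    have hu' : u <:+ tmp ++ u := List.suffix_append tmp u
    rcases Nat.lt_or_ge u.length t.length with hlt | hle
    · have := List.suffix_of_suffix_length_le hu' h (Nat.le_of_lt hlt)
      revert this
      simp only [babyA, List.mem_cons, List.not_mem_nil, or_false] at ht hu
      rcases ht with rfl|rfl|rfl|rfl <;> rcases hu with rfl|rfl|rfl|rfl <;> decide
    · have := List.suffix_of_suffix_length_le h hu' hle
      revert this
      simp only [babyA, List.mem_cons, List.not_mem_nil, or_false] at ht hu
      rcases ht with rfl|rfl|rfl|rfl <;> rcases hu with rfl|rfl|rfl|rfl <;> decide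
  · rintro rfl; exact List.suffix_append tmp t

-- the invariant relating A's tmp to B's prev
def InvAB (tmp prev : List Char) : Prop := ∀ t ∈ babyA, ((t <:+ tmp) ↔ t = prev)

theorem not_prefix_of_short {t w : List Char} (h : w.length < t.length) : ¬ (t <+: w) :=
  fun hp => absurd hp.length_le (by omega)


theorem babyA_ne_nil {u : List Char} (hu : u ∈ babyA) : u ≠ [] := by
  intro he; rw [he] at hu; revert hu; decide

theorem check_iff (tmp prev u : List Char) (hu : u ∈ babyA) (hinv : InvAB tmp prev) :
    (u = PySem.List.slice tmp (some (-(u.length : Int))) none) ↔ u = prev := by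
  rw [eq_slice_iff_suffix u tmp (babyA_ne_nil hu)]
  exact hinv u hu

theorem loopA_skip (j : Char) (rest s tmp : List Char) (h : s ++ [j] ∉ babyA) :
    loopA (j :: rest) s tmp = loopA rest (s ++ [j]) tmp := by
  simp only [loopA, if_neg h]

theorem loopA_match (j : Char) (rest s tmp prev : List Char) (hmem : s ++ [j] ∈ babyA)
    (hinv : InvAB tmp prev) :
    loopA (j :: rest) s tmp
      = if s ++ [j] = prev then s ++ [j] else loopA rest [] (tmp ++ (s ++ [j])) := by
  simp only [loopA, if_pos hmem]
  simp only [check_iff tmp prev _ hmem hinv]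

theorem loopA_prefixfail (cs : List Char) : ∀ (s tmp : List Char), s ≠ [] →
    (∀ t ∈ babyA, ¬ s <+: t) → loopA cs s tmp = s ++ cs := by
  induction cs with
  | nil => intro s tmp _ _; simp [loopA]
  | cons j rest ih =>
    intro s tmp hs hnp
    have hmem : s ++ [j] ∉ babyA := fun hm => hnp _ hm ⟨[j], rfl⟩
    rw [loopA_skip _ _ _ _ hmem,
        ih (s ++ [j]) tmp (by simp)
          (fun t ht hp => hnp t ht ((List.prefix_append s [j]).trans hp))]
    simp

theorem main_sync (n : Nat) : ∀ cs tmp prev, cs.length ≤ n → InvAB tmp prev →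
    ((loopA cs [] tmp = []) ↔ (okB cs prev = true)) := by
  induction n with
  | zero =>
    intro cs tmp prev hn _
    have : cs = [] := List.eq_nil_of_length_eq_zero (by omega)
    subst this; simp [loopA, okB]
  | succ n ih =>
    intro cs tmp prev hn hinv
    match cs with
    | [] => simp [loopA, okB]
    | [c1] =>
      have hA : loopA [c1] [] tmp = [c1] := by simp [loopA, babyA]
      have na : ¬ (['a','y','a'] <+: [c1]) := not_prefix_of_short (by simp)
      have ny : ¬ (['y','e'] <+: [c1]) := not_prefix_of_short (by simp)
      have nw : ¬ (['w','o','o'] <+: [c1]) := not_prefix_of_short (by simp)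
      have nm : ¬ (['m','a'] <+: [c1]) := not_prefix_of_short (by simp)
      simp [okB, hA, na, ny, nw, nm]
    | c1 :: c2 :: cs2 =>
      have hlen : cs2.length + 2 ≤ n + 1 := by simpa using hn
      by_cases h1y : c1 = 'y'
      · subst h1y
        by_cases h2 : c2 = 'e'
        · subst h2
          rw [loopA_skip _ _ _ _ (by decide), loopA_match _ _ _ _ prev (by decide) hinv]; simp only [List.nil_append]
          by_cases hpe : (['y'] ++ ['e'] : List Char) = prev
          · rw [if_pos hpe]
            simp [okB, List.cons_prefix_cons, ← (show (['y','e'] : List Char) = prev from hpe)]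
          · rw [if_neg hpe]
            have hB : okB ('y' :: 'e' :: cs2) prev = okB cs2 ['y','e'] := by
              simp [okB, List.cons_prefix_cons, (show ¬ (['y','e'] : List Char) = prev from hpe)]
            rw [hB]
            exact ih cs2 (tmp ++ ['y','e']) ['y','e'] (by omega)
              (fun t ht => suffix_append_syl tmp t _ ht (by decide))
        · have h2' : ¬ ('e' = c2) := fun h => h2 h.symm
          rw [loopA_skip _ _ _ _ (by decide), loopA_skip _ _ _ _ (by simp [babyA, h2])]
          simp only [List.nil_append]
          rw [loopA_prefixfail cs2 (['y'] ++ [c2]) tmp (by simp) (by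
                intro t ht
                simp only [babyA, List.mem_cons, List.not_mem_nil, or_false] at ht
                rcases ht with rfl | rfl | rfl | rfl <;> simp [List.cons_prefix_cons, h2])]
          simp [okB, List.cons_prefix_cons, h2']
      · by_cases h1m : c1 = 'm'
        · subst h1m
          by_cases h2 : c2 = 'a'
          · subst h2
            rw [loopA_skip _ _ _ _ (by decide), loopA_match _ _ _ _ prev (by decide) hinv]; simp only [List.nil_append]
            by_cases hpe : (['m'] ++ ['a'] : List Char) = prev
            · rw [if_pos hpe]
              simp [okB, List.cons_prefix_cons, ← (show (['m','a'] : List Char) = prev from hpe)]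
            · rw [if_neg hpe]
              have hB : okB ('m' :: 'a' :: cs2) prev = okB cs2 ['m','a'] := by
                simp [okB, List.cons_prefix_cons, (show ¬ (['m','a'] : List Char) = prev from hpe)]
              rw [hB]
              exact ih cs2 (tmp ++ ['m','a']) ['m','a'] (by omega)
                (fun t ht => suffix_append_syl tmp t _ ht (by decide))
          · have h2' : ¬ ('a' = c2) := fun h => h2 h.symm
            rw [loopA_skip _ _ _ _ (by decide), loopA_skip _ _ _ _ (by simp [babyA, h2])]
            simp only [List.nil_append]
            rw [loopA_prefixfail cs2 (['m'] ++ [c2]) tmp (by simp) (by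
                  intro t ht
                  simp only [babyA, List.mem_cons, List.not_mem_nil, or_false] at ht
                  rcases ht with rfl | rfl | rfl | rfl <;> simp [List.cons_prefix_cons, h2])]
            simp [okB, List.cons_prefix_cons, h2']
        · by_cases h1a : c1 = 'a'
          · subst h1a
            by_cases h2 : c2 = 'y'
            · subst h2
              cases cs2 with
              | nil =>
                rw [loopA_skip _ _ _ _ (by decide), loopA_skip _ _ _ _ (by decide)]
                simp [loopA, okB, List.cons_prefix_cons]
              | cons c3 cs3 =>
                have hlen3 : cs3.length + 3 ≤ n + 1 := by simpa using hn
                by_cases h3 : c3 = 'a'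
                · subst h3
                  rw [loopA_skip _ _ _ _ (by decide), loopA_skip _ _ _ _ (by decide),
                      loopA_match _ _ _ _ prev (by decide) hinv]; simp only [List.nil_append]
                  by_cases hpe : ((['a'] ++ ['y']) ++ ['a'] : List Char) = prev
                  · rw [if_pos hpe]
                    simp [okB, List.cons_prefix_cons, ← (show (['a','y','a'] : List Char) = prev from hpe)]
                  · rw [if_neg hpe]
                    have hB : okB ('a' :: 'y' :: 'a' :: cs3) prev = okB cs3 ['a','y','a'] := by
                      simp [okB, List.cons_prefix_cons, (show ¬ (['a','y','a'] : List Char) = prev from hpe)]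
                    rw [hB]
                    exact ih cs3 (tmp ++ ['a','y','a']) ['a','y','a'] (by omega)
                      (fun t ht => suffix_append_syl tmp t _ ht (by decide))
                · have h3' : ¬ ('a' = c3) := fun h => h3 h.symm
                  rw [loopA_skip _ _ _ _ (by decide), loopA_skip _ _ _ _ (by decide),
                      loopA_skip _ _ _ _ (by simp [babyA, h3])]
                  simp only [List.nil_append]
                  rw [loopA_prefixfail cs3 ((['a'] ++ ['y']) ++ [c3]) tmp (by simp) (by
                        intro t ht
                        simp only [babyA, List.mem_cons, List.not_mem_nil, or_false] at ht
                        rcases ht with rfl | rfl | rfl | rfl <;> simp [List.cons_prefix_cons, h3])]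
                  simp [okB, List.cons_prefix_cons, h3']
            · have h2' : ¬ ('y' = c2) := fun h => h2 h.symm
              rw [loopA_skip _ _ _ _ (by decide), loopA_skip _ _ _ _ (by simp [babyA, h2])]
              simp only [List.nil_append]
              rw [loopA_prefixfail cs2 (['a'] ++ [c2]) tmp (by simp) (by
                    intro t ht
                    simp only [babyA, List.mem_cons, List.not_mem_nil, or_false] at ht
                    rcases ht with rfl | rfl | rfl | rfl <;> simp [List.cons_prefix_cons, h2])]
              simp [okB, List.cons_prefix_cons, h2']
          · by_cases h1w : c1 = 'w'
            · subst h1w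
              by_cases h2 : c2 = 'o'
              · subst h2
                cases cs2 with
                | nil =>
                  rw [loopA_skip _ _ _ _ (by decide), loopA_skip _ _ _ _ (by decide)]
                  simp [loopA, okB, List.cons_prefix_cons]
                | cons c3 cs3 =>
                  have hlen3 : cs3.length + 3 ≤ n + 1 := by simpa using hn
                  by_cases h3 : c3 = 'o'
                  · subst h3
                    rw [loopA_skip _ _ _ _ (by decide), loopA_skip _ _ _ _ (by decide),
                        loopA_match _ _ _ _ prev (by decide) hinv]; simp only [List.nil_append]
                    by_cases hpe : ((['w'] ++ ['o']) ++ ['o'] : List Char) = prev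
                    · rw [if_pos hpe]
                      simp [okB, List.cons_prefix_cons, ← (show (['w','o','o'] : List Char) = prev from hpe)]
                    · rw [if_neg hpe]
                      have hB : okB ('w' :: 'o' :: 'o' :: cs3) prev = okB cs3 ['w','o','o'] := by
                        simp [okB, List.cons_prefix_cons, (show ¬ (['w','o','o'] : List Char) = prev from hpe)]
                      rw [hB]
                      exact ih cs3 (tmp ++ ['w','o','o']) ['w','o','o'] (by omega)
                        (fun t ht => suffix_append_syl tmp t _ ht (by decide))
                  · have h3' : ¬ ('o' = c3) := fun h => h3 h.symm
                    rw [loopA_skip _ _ _ _ (by decide), loopA_skip _ _ _ _ (by decide),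
                        loopA_skip _ _ _ _ (by simp [babyA, h3])]
                    simp only [List.nil_append]
                    rw [loopA_prefixfail cs3 ((['w'] ++ ['o']) ++ [c3]) tmp (by simp) (by
                          intro t ht
                          simp only [babyA, List.mem_cons, List.not_mem_nil, or_false] at ht
                          rcases ht with rfl | rfl | rfl | rfl <;> simp [List.cons_prefix_cons, h3])]
                    simp [okB, List.cons_prefix_cons, h3']
              · have h2' : ¬ ('o' = c2) := fun h => h2 h.symm
                rw [loopA_skip _ _ _ _ (by decide), loopA_skip _ _ _ _ (by simp [babyA, h2])]
                simp only [List.nil_append]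
                rw [loopA_prefixfail cs2 (['w'] ++ [c2]) tmp (by simp) (by
                      intro t ht
                      simp only [babyA, List.mem_cons, List.not_mem_nil, or_false] at ht
                      rcases ht with rfl | rfl | rfl | rfl <;> simp [List.cons_prefix_cons, h2])]
                simp [okB, List.cons_prefix_cons, h2']
            · have ha' : ¬ ('a' = c1) := fun h => h1a h.symm
              have hy' : ¬ ('y' = c1) := fun h => h1y h.symm
              have hw' : ¬ ('w' = c1) := fun h => h1w h.symm
              have hm' : ¬ ('m' = c1) := fun h => h1m h.symm
              rw [loopA_skip _ _ _ _ (by simp [babyA])]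
              simp only [List.nil_append]
              rw [loopA_prefixfail (c2 :: cs2) [c1] tmp (by simp) (by
                    intro t ht
                    simp only [babyA, List.mem_cons, List.not_mem_nil, or_false] at ht
                    rcases ht with rfl | rfl | rfl | rfl <;>
                      simp [List.cons_prefix_cons, h1a, h1y, h1w, h1m])]
              simp [okB, List.cons_prefix_cons, ha', hy', hw', hm']

theorem word_iff (w : List Char) : (loopA w [] [] = []) ↔ (okB w [] = true) := by
  apply main_sync w.length w [] [] le_rfl
  intro t ht
  constructor
  · intro hs
    have := hs.length_le
    exfalso
    simp only [babyA, List.mem_cons, List.not_mem_nil, or_false] at ht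
    rcases ht with rfl|rfl|rfl|rfl <;> simp at this
  · rintro rfl
    simp only [babyA, List.mem_cons, List.not_mem_nil, or_false] at ht
    rcases ht with h|h|h|h <;> simp at h

theorem fold_count (l : List String) : ∀ (a : Int),
    l.foldl (fun answer i => if loopA i.toList [] [] = [] then answer + 1 else answer) a
      = a + (l.countP (fun w => okB w.toList []) : Int) := by
  induction l with
  | nil => intro a; simp
  | cons x xs ih =>
    intro a
    rw [List.foldl_cons, List.countP_cons, ih]
    by_cases h : loopA x.toList [] [] = []
    · rw [if_pos h]
      have : okB x.toList [] = true := (word_iff x.toList).mp h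
      simp [this]; ring
    · rw [if_neg h]
      have : okB x.toList [] ≠ true := fun hb => h ((word_iff x.toList).mpr hb)
      simp [this]

-- ===== VERDICT (by name: the statement is the Claim_ definition above) =====
theorem solution_spec : Claim_equal_solution := by
  intro babbling _
  unfold Spec_solution solution solution_alt
  rw [fold_count]
  simp
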